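-- pv_equiv track=rewrite | github.com/rammtllc/083025a-app | tools2/test3.py | sliding_window_dynamic
-- ===== SOURCE A (Python) =====
-- def sliding_window_dynamic(sentences, max_samples=9999):
--     """
--     Generate samples with a sliding window that:
--     - Starts with the first sentence
--     - Each new sample removes the last sentence of the previous sample
--       and adds the next sentence
--     """
--     samples = []
--     n = len(sentences)
--
--     if n == 0:
--         return samples
--
--     # Start with first sentence
--     current_window = [sentences[0]]
--     samples.append(" / ".join(current_window))
--
--     i = 1
--     while i < n and len(samples) < max_samples:
--         # Remove last sentence from previous window
--         if len(current_window) > 1: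
--             current_window.pop(-1)
--
--         # Add next sentence
--         current_window.append(sentences[i])
--
--         # Add new sample
--         samples.append(" / ".join(current_window))
--
--         i += 1
--
--     return samples[:max_samples]
-- ===== SOURCE B (Python) =====
-- def sliding_window_dynamic(sentences, max_samples=9999):
--     if not sentences or max_samples <= 0:
--         return []
--     s0 = sentences[0]
--     k = min(len(sentences), max_samples)
--     return [s0] + [f"{s0} / {s}" for s in sentences[1:k]]
-- ===== Notes on version B (the rewrite author's own statement) =====
-- stated objective: simpler
-- what changed: Dropped the mutable window/pop/append loop simulation: since the window is always [sentences[0]] or [sentences[0], sentences[i]], B derives each sample directly as a closed-form comprehension over sentences[1:min(n,max_samples)].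
import Mathlib
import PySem

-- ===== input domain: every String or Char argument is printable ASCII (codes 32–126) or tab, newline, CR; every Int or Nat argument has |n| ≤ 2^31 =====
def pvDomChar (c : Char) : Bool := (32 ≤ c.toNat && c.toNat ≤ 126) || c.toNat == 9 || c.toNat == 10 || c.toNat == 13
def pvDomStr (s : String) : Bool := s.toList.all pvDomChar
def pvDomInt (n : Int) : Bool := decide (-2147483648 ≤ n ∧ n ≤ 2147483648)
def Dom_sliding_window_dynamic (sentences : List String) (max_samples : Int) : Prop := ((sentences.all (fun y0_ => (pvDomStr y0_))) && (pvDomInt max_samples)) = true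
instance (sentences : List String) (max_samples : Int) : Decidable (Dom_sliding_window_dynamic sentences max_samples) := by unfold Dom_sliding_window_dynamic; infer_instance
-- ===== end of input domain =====

-- B replaces A's mutable window/pop/append loop by a closed-form list comprehension over
-- sentences[1:min(n, max_samples)]; same return value on every input (objective: simpler).

-- ===== PORT A =====
-- while-loop of A: state = (i, current_window, samples)
def swLoop (sentences : List String) (max_samples : Int) (n : Nat) (i : Nat)
    (window : List String) (samples : List String) : List String :=
  if h : i < n ∧ (samples.length : Int) < max_samples then
    -- pop(-1) when len(current_window) > 1
    let w1 := if window.length > 1 then window.dropLast else window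
    -- current_window.append(sentences[i])  (i < n, so the index is in range)
    let w2 := w1 ++ [(PySem.List.pyGet? sentences (i : Int)).getD ""]
    swLoop sentences max_samples n (i + 1) w2 (samples ++ [PySem.Str.join " / " w2])
  else samples
termination_by n - i
decreasing_by omega

def sliding_window_dynamic (sentences : List String) (max_samples : Int) : List String :=
  let n := sentences.length
  if n = 0 then []
  else
    let current_window := [(PySem.List.pyGet? sentences (0 : Int)).getD ""]
    let samples := [PySem.Str.join " / " current_window]
    PySem.List.slice (swLoop sentences max_samples n 1 current_window samples) none (some max_samples)

-- ===== PORT B =====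
def sliding_window_dynamic_alt (sentences : List String) (max_samples : Int) : List String :=
  match sentences with
  | [] => []
  | s0 :: _ =>
    if max_samples ≤ 0 then []
    else
      let k : Int := min (sentences.length : Int) max_samples
      s0 :: (PySem.List.slice sentences (some 1) (some k)).map (fun s => s0 ++ " / " ++ s)

-- ===== PRECONDITION & SPEC =====
def Spec_sliding_window_dynamic (sentences : List String) (max_samples : Int) (out : List String) : Prop := out = sliding_window_dynamic_alt sentences max_samples
instance (sentences : List String) (max_samples : Int) (out : List String) : Decidable (Spec_sliding_window_dynamic sentences max_samples out) := by unfold Spec_sliding_window_dynamic; infer_instance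

-- ===== CLAIM (what is proved, stated in full; the proofs are below) =====
def Claim_equal_sliding_window_dynamic : Prop := ∀ (sentences : List String) (max_samples : Int), Dom_sliding_window_dynamic sentences max_samples → Spec_sliding_window_dynamic sentences max_samples (sliding_window_dynamic sentences max_samples)

-- ===== LEMMAS AND PROOFS =====

theorem pv_join_single (a : String) : PySem.Str.join " / " [a] = a := by
  apply String.toList_injective
  simp [PySem.Str.toList_join, PySem.Chars.join_singleton]

theorem pv_join_pair (a b : String) : PySem.Str.join " / " [a, b] = a ++ " / " ++ b := by
  apply String.toList_injective
  simp [PySem.Str.toList_join, PySem.Chars.join_cons_cons, PySem.Chars.join_singleton]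

-- the loop, once the window has shape [s0, x] and samples.length = i:
-- it appends one sample "s0 / sentences[j]" for each j in [i, min n max_samples)
theorem swLoop_eq (sentences : List String) (ms : Int) (s0 : String) :
    ∀ cnt i samples (x : String), samples.length = i →
      cnt = min sentences.length ms.toNat - i →
      swLoop sentences ms sentences.length i [s0, x] samples
        = samples ++ (List.range' i cnt).map
            (fun j => s0 ++ " / " ++ sentences.getD j "") := by
  intro cnt
  induction cnt with
  | zero =>
    intro i samples x hs hc
    rw [swLoop]
    rw [dif_neg]
    · simp
    · rw [hs]; omega
  | succ m ih =>
    intro i samples x hs hc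
    have hi : i < sentences.length := by omega
    rw [swLoop]
    rw [dif_pos (by rw [hs]; constructor <;> omega)]
    simp only [List.length_cons, List.length_nil]
    have hget : (PySem.List.pyGet? sentences (i : Int)).getD ""
        = sentences.getD i "" := by
      rw [PySem.List.pyGet?_natCast, List.getElem?_eq_getElem hi]
      simp [List.getD, List.getElem?_eq_getElem hi]
    rw [hget]
    show swLoop sentences ms sentences.length (i + 1) ([s0] ++ [sentences.getD i ""])
        (samples ++ [PySem.Str.join " / " ([s0] ++ [sentences.getD i ""])])
      = samples ++ (List.range' i (m + 1)).map (fun j => s0 ++ " / " ++ sentences.getD j "")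
    simp only [List.singleton_append]
    rw [ih (i + 1) (samples ++ [PySem.Str.join " / " [s0, sentences.getD i ""]])
      (sentences.getD i "") (by simp [hs]) (by omega)]
    rw [pv_join_pair]
    simp [List.range']

theorem pv_take_map (s0 : String) (rest : List String) :
    ∀ m, m ≤ rest.length →
      (List.range' 1 m).map (fun j => s0 ++ " / " ++ (s0 :: rest).getD j "")
        = (rest.take m).map (fun s => s0 ++ " / " ++ s) := by
  intro m hm
  apply List.ext_getElem
  · simp [Nat.min_eq_left hm]
  · intro j h1 h2
    simp only [List.getElem_map, List.getElem_range', List.getElem_take]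
    congr 1
    have hj : j < m := by simpa using h1
    have hjr : j < rest.length := by omega
    have h1j : 1 + 1 * j = j + 1 := by omega
    rw [h1j]
    simp [List.getD, List.getElem?_eq_getElem hjr]

-- ===== VERDICT (by name: the statement is the Claim_ definition above) =====
theorem sliding_window_dynamic_spec : Claim_equal_sliding_window_dynamic := by
  intro sentences ms _
  unfold Spec_sliding_window_dynamic
  match sentences with
  | [] => rfl
  | s0 :: rest =>
    unfold sliding_window_dynamic sliding_window_dynamic_alt
    simp only [List.length_cons, Nat.succ_ne_zero, reduceIte]
    have hget0 : (PySem.List.pyGet? (s0 :: rest) (0 : Int)).getD "" = s0 := by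
      rw [show ((0:Int) = ((0:Nat):Int)) from rfl, PySem.List.pyGet?_natCast]; rfl
    rw [hget0, pv_join_single]
    by_cases hms : ms ≤ 0
    · -- loop body never runs (1 < ms is false); slice [:ms] of [s0] with ms ≤ 0 is []
      rw [swLoop, dif_neg (by simp; omega)]
      rw [if_pos hms]
      by_cases h0 : ms = 0
      · subst h0; rw [PySem.List.slice_to _ le_rfl]; rfl
      · obtain ⟨k, hk, rfl⟩ : ∃ k : Nat, 0 < k ∧ ms = -(k : Int) :=
          ⟨(-ms).toNat, by omega, by omega⟩
        rw [PySem.List.slice_to_neg_natCast _ _ hk]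
        simp
        omega
    · rw [if_neg (by omega)]
      set M := min (rest.length + 1) ms.toNat with hM
      by_cases hcond : 1 < (s0 :: rest).length ∧ (1 : Int) < ms
      · -- first iteration of the loop (window has length 1, no pop), then swLoop_eq from i = 2
        have h1n : 1 < (s0 :: rest).length := hcond.1
        rw [swLoop, dif_pos (by simpa using hcond)]
        have hget1 : (PySem.List.pyGet? (s0 :: rest) ((1:Nat) : Int)).getD ""
            = (s0 :: rest).getD 1 "" := by
          rw [PySem.List.pyGet?_natCast]
          simp [List.getD]
        simp only [List.length_cons, List.length_nil]
        rw [hget1]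
        show PySem.List.slice (swLoop (s0 :: rest) ms (rest.length + 1) (1 + 1)
            ([s0] ++ [(s0 :: rest).getD 1 ""])
            ([s0] ++ [PySem.Str.join " / " ([s0] ++ [(s0 :: rest).getD 1 ""])])) none (some ms) = _
        simp only [List.singleton_append]
        conv_lhs => rw [show rest.length + 1 = (s0 :: rest).length from rfl]
        rw [swLoop_eq (s0 :: rest) ms s0 (M - 2) (1 + 1)
          [s0, PySem.Str.join " / " [s0, (s0 :: rest).getD 1 ""]] _
          (by rfl) (by simp only [List.length_cons]; omega)]
        rw [pv_join_pair]
        have hms2 : (1 : Int) < ms := hcond.2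
        have hM2 : 2 ≤ M := by
          simp only [List.length_cons] at h1n
          have hb : ms.toNat ≥ 2 := by omega
          omega
        have hrange : List.range' 1 (M - 1) = 1 :: List.range' 2 (M - 2) := by
          have h : M - 1 = (M - 2) + 1 := by omega
          rw [h]; simp [List.range']
        have hlist : [s0, s0 ++ " / " ++ (s0 :: rest).getD 1 ""]
            ++ (List.range' (1 + 1) (M - 2)).map (fun j => s0 ++ " / " ++ (s0 :: rest).getD j "")
            = s0 :: (List.range' 1 (M - 1)).map (fun j => s0 ++ " / " ++ (s0 :: rest).getD j "") := by
          rw [hrange]; simp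
        rw [hlist]
        have hlen2 : (s0 :: (List.range' 1 (M - 1)).map
            (fun j => s0 ++ " / " ++ (s0 :: rest).getD j "")).length = M := by
          simp; omega
        rw [PySem.List.slice_to _ (by omega), List.take_of_length_le (by rw [hlen2]; simp only [hM]; omega)]
        -- B side
        have hk : min (((rest.length + 1 : Nat)) : Int) ms = ((M : Nat) : Int) := by
          simp only [hM]; omega
        rw [hk, show ((1:Int) = ((1:Nat):Int)) from rfl, PySem.List.slice_natCast]
        simp only [List.drop_succ_cons, List.drop_zero]
        rw [← pv_take_map s0 rest (M - 1) (by simp only [hM]; omega)]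
      · -- n = 1 or ms = 1: samples stays [s0] and B's slice [1:1] is empty
        rw [swLoop, dif_neg (by simpa using hcond)]
        have hM1' : M = 1 := by
          rcases not_and_or.mp hcond with h | h
          · simp only [List.length_cons] at h; simp only [hM]; omega
          · simp only [hM]; omega
        rw [PySem.List.slice_to _ (by omega), List.take_of_length_le (by simp; omega)]
        have hk : min (((rest.length + 1 : Nat)) : Int) ms = (1 : Int) := by
          simp only [hM] at hM1'
          omega
        rw [hk]
        rw [show ((1:Int) = ((1:Nat):Int)) from rfl, PySem.List.slice_natCast]
        simp
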